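-- pv_equiv track=rewrite | github.com/g-s01/data-programming-btp | gautam-results-and-analysis/raw-to-fine-direct/through-lfs/context-window-one/lfs_for_raw_sentence_gpt.py | label_sentence_Group_ORG
-- ===== SOURCE A (Python) =====
-- ABSTAIN = -1
--
-- Group_ORG = 5
--
-- def label_sentence_Group_ORG(tokens):
--     """
--     Labels each token in a sentence as Group-ORG if it indicates an organization.
--     Returns ABSTAIN for tokens that do not match the category.
--
--     Args:
--     tokens: list of str - A list of words representing a sentence.
--
--     Returns:
--     list of str - A list of labels for each token.
--     """
--     # Common organization indicators
--     org_indicators = {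
--         'academy', 'award', 'party', 'army', 'faction', 'empire', 'chain', 'association',
--         'store', 'hotels', 'company', 'university', 'corporation', 'union', 'federation',
--         'institute', 'congress', 'committee', 'council', 'league', 'organization', 'firm',
--         'department', 'agency', 'group', 'bank', 'charity', 'foundation'
--     }
--     org_context = {
--         'founded', 'led', 'association', 'member', 'board', 'president', 'ceo', 'vice',
--         'chairman', 'founder', 'headquarters', 'offices', 'division', 'subsidiary', 'affiliate',
--         'branch', 'partner', 'alliance'
--     }
--
--     labels = []
--
--     for i, token in enumerate(tokens):
--         token_lower = token.lower()
--
--         # Check if the token or surrounding tokens suggest an organization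
--         if (
--             token_lower in org_indicators and ( # The token itself indicates an organization
--             (i > 0 and tokens[i - 1].lower() in org_indicators) or  # Preceded by an organization indicator
--             (i < len(tokens) - 1 and tokens[i + 1].lower() in org_indicators) or  # Followed by an organization indicator
--             (i > 0 and tokens[i - 1].lower() in org_context) or  # Preceded by an organization context keyword
--             (i < len(tokens) - 1 and tokens[i + 1].lower() in org_context))  # Followed by an organization context keyword
--         ):
--             labels.append(Group_ORG)
--         else:
--             labels.append(ABSTAIN)  # Default to 'O' if no match is found
--
--     return labels
-- ===== SOURCE B (Python) =====
-- ABSTAIN = -1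
--
-- Group_ORG = 5
--
-- def label_sentence_Group_ORG(tokens):
--     org_indicators = {
--         'academy', 'award', 'party', 'army', 'faction', 'empire', 'chain', 'association',
--         'store', 'hotels', 'company', 'university', 'corporation', 'union', 'federation',
--         'institute', 'congress', 'committee', 'council', 'league', 'organization', 'firm',
--         'department', 'agency', 'group', 'bank', 'charity', 'foundation'
--     }
--     org_context = {
--         'founded', 'led', 'association', 'member', 'board', 'president', 'ceo', 'vice',
--         'chairman', 'founder', 'headquarters', 'offices', 'division', 'subsidiary', 'affiliate',
--         'branch', 'partner', 'alliance'
--     }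
--     # State-machine scan: stream the tokens once with one-token lookahead, carrying
--     # only whether the PREVIOUS token was a trigger (indicator-or-context word).
--     # No list indexing anywhere; a neighbor test in A is 'in indicators or in context',
--     # i.e. membership in the union, so the carried flag is exact.
--     trigger = org_indicators | org_context
--     it = iter(tokens)
--     try:
--         cur = next(it).lower()
--     except StopIteration:
--         return []
--     out = []
--     prev_trig = False
--     for nxt in it:
--         nl = nxt.lower()
--         out.append(Group_ORG if cur in org_indicators and (prev_trig or nl in trigger) else ABSTAIN)
--         prev_trig = cur in trigger
--         cur = nl
--     out.append(Group_ORG if cur in org_indicators and prev_trig else ABSTAIN)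
--     return out
-- ===== Notes on version B (the rewrite author's own statement) =====
-- stated objective: alternative
-- what changed: A labels each position by random-access indexing into the token list with four guarded neighbor set tests; B is a streaming state-machine scan with one-token lookahead that carries a single previous-token-trigger flag over the union of the indicator and context sets and never indexes the list, handling the last token after the loop.
import Mathlib
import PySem

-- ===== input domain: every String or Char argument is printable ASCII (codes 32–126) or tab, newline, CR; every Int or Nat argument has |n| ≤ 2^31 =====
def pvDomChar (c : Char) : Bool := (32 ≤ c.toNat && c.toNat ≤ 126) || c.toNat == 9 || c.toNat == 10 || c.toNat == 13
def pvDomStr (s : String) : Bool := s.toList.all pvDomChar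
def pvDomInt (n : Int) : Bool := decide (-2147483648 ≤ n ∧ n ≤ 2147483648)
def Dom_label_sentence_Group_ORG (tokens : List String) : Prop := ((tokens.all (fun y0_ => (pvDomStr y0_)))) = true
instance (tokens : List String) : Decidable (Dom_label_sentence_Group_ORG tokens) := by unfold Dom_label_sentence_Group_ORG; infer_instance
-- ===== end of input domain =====

-- B replaces A's indexed loop (four random-access neighbor set tests per token) by a single
-- streaming state-machine scan with one-token lookahead and a carried previous-trigger flag
-- over the union set; no indexing (alternative decomposition, same asymptotic cost).

-- ===== PORT A =====
-- module-level constants of Source A (Python set literals)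
def pvOrgIndicators : PySem.Set String := PySem.Set.ofList
  ["academy", "award", "party", "army", "faction", "empire", "chain", "association",
   "store", "hotels", "company", "university", "corporation", "union", "federation",
   "institute", "congress", "committee", "council", "league", "organization", "firm",
   "department", "agency", "group", "bank", "charity", "foundation"]

def pvOrgContext : PySem.Set String := PySem.Set.ofList
  ["founded", "led", "association", "member", "board", "president", "ceo", "vice",
   "chairman", "founder", "headquarters", "offices", "division", "subsidiary", "affiliate",
   "branch", "partner", "alliance"]

-- tokens[i-1] / tokens[i+1] are only reached under the i>0 / i<len-1 guards, where the
-- index is in range, so pyGetD with default "" is exact there.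
def label_sentence_Group_ORG (tokens : List String) : List Int :=
  (PySem.List.enumerate tokens).foldl (fun labels p =>
    labels ++ [
      if pvOrgIndicators.contains (PySem.Str.lower p.2) &&
         (((decide (p.1 > 0) && pvOrgIndicators.contains (PySem.Str.lower (PySem.List.pyGetD tokens (p.1 - 1) ""))) ||
           (decide (p.1 < PySem.List.len tokens - 1) && pvOrgIndicators.contains (PySem.Str.lower (PySem.List.pyGetD tokens (p.1 + 1) ""))) ||
           (decide (p.1 > 0) && pvOrgContext.contains (PySem.Str.lower (PySem.List.pyGetD tokens (p.1 - 1) ""))) ||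
           (decide (p.1 < PySem.List.len tokens - 1) && pvOrgContext.contains (PySem.Str.lower (PySem.List.pyGetD tokens (p.1 + 1) "")))))
      then (5 : Int) else (-1 : Int)]) []

-- ===== PORT B =====
-- Source B's trigger = org_indicators | org_context
def pvTrigger : PySem.Set String := pvOrgIndicators.union pvOrgContext

-- Source B's streaming for-loop over the iterator: state = (out, prev_trig, cur), exactly the
-- loop's variables; the last token's label is appended after the loop as in Source B.
def label_sentence_Group_ORG_alt (tokens : List String) : List Int :=
  match tokens with
  | [] => []
  | t :: rest =>
    let s := rest.foldl (fun (s : List Int × Bool × String) nxt =>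
        let nl := PySem.Str.lower nxt
        (s.1 ++ [if pvOrgIndicators.contains s.2.2 && (s.2.1 || pvTrigger.contains nl)
                 then (5 : Int) else (-1 : Int)],
         pvTrigger.contains s.2.2, nl))
      (([] : List Int), false, PySem.Str.lower t)
    s.1 ++ [if pvOrgIndicators.contains s.2.2 && s.2.1 then (5 : Int) else (-1 : Int)]

-- ===== PRECONDITION & SPEC =====
def Spec_label_sentence_Group_ORG (tokens : List String) (out : List Int) : Prop := out = label_sentence_Group_ORG_alt tokens
instance (tokens : List String) (out : List Int) : Decidable (Spec_label_sentence_Group_ORG tokens out) := by unfold Spec_label_sentence_Group_ORG; infer_instance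

-- ===== CLAIM (what is proved, stated in full; the proofs are below) =====
def Claim_equal_label_sentence_Group_ORG : Prop := ∀ (tokens : List String), Dom_label_sentence_Group_ORG tokens → Spec_label_sentence_Group_ORG tokens (label_sentence_Group_ORG tokens)

-- ===== LEMMAS AND PROOFS =====

-- Source B's loop body, as a named step function (defeq to the lambda in the port)
def pvStep (s : List Int × Bool × String) (nxt : String) : List Int × Bool × String :=
  (s.1 ++ [if pvOrgIndicators.contains s.2.2 && (s.2.1 || pvTrigger.contains (PySem.Str.lower nxt))
           then (5 : Int) else (-1 : Int)],
   pvTrigger.contains s.2.2, PySem.Str.lower nxt)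

-- structural view of Source B's loop: cons-building recursion over (prev_trig, cur, rest)
def pvAltGo (p : Bool) (cur : String) : List String → List Int
  | [] => [if pvOrgIndicators.contains cur && p then (5 : Int) else (-1 : Int)]
  | nxt :: rs =>
    (if pvOrgIndicators.contains cur && (p || pvTrigger.contains (PySem.Str.lower nxt))
     then (5 : Int) else (-1 : Int)) :: pvAltGo (pvTrigger.contains cur) (PySem.Str.lower nxt) rs

-- Source B's foldl with accumulator = the structural recursion
theorem pv_fold_eq_go : ∀ (rest : List String) (st : List Int × Bool × String),
    (rest.foldl pvStep st).1 ++
      [if pvOrgIndicators.contains (rest.foldl pvStep st).2.2 && (rest.foldl pvStep st).2.1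
       then (5 : Int) else (-1 : Int)]
    = st.1 ++ pvAltGo st.2.1 st.2.2 rest := by
  intro rest
  induction rest with
  | nil => intro st; simp [pvAltGo]
  | cons nxt rs ih =>
      intro st
      simp only [List.foldl_cons]
      exact (ih (pvStep st nxt)).trans (by simp [pvStep, pvAltGo])

theorem pvAltGo_length : ∀ (rest : List String) (p : Bool) (cur : String),
    (pvAltGo p cur rest).length = rest.length + 1 := by
  intro rest
  induction rest with
  | nil => intro p cur; simp [pvAltGo]
  | cons nxt rs ih => intro p cur; simp [pvAltGo, ih]

-- the i-th label produced by the scan, in terms of the lowered-token list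
theorem pvAltGo_getD : ∀ (rest : List String) (p : Bool) (cur : String) (i : Nat),
    i < rest.length + 1 →
    (pvAltGo p cur rest).getD i 0 =
      (if pvOrgIndicators.contains ((cur :: rest.map (fun t => PySem.Str.lower t)).getD i "") &&
          ((if i = 0 then p
            else pvTrigger.contains ((cur :: rest.map (fun t => PySem.Str.lower t)).getD (i - 1) "")) ||
           (decide (i + 1 < rest.length + 1) &&
            pvTrigger.contains ((cur :: rest.map (fun t => PySem.Str.lower t)).getD (i + 1) "")))
       then (5 : Int) else (-1 : Int)) := by
  intro rest
  induction rest with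
  | nil =>
      intro p cur i hi
      have h0 : i = 0 := by simp at hi; omega
      subst h0
      simp [pvAltGo]
  | cons nxt rs ih =>
      intro p cur i hi
      cases i with
      | zero => simp [pvAltGo]
      | succ j =>
          have hj : j < rs.length + 1 := by simpa using hi
          have := ih (pvTrigger.contains cur) (PySem.Str.lower nxt) j hj
          simp only [pvAltGo, List.getD_cons_succ, List.map_cons] at this ⊢
          rw [this]
          cases j with
          | zero => simp
          | succ k => simp

-- membership in the union set = disjunction of the two memberships
theorem pv_union_contains (w : String) :
    pvTrigger.contains w = (pvOrgIndicators.contains w || pvOrgContext.contains w) := by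
  rw [Bool.eq_iff_iff]
  simp [pvTrigger, PySem.Set.mem_union]

-- A's flat four-way disjunction regrouped by neighbor side
theorem pv_bool_regroup (self a b p q r s : Bool) :
    (self && ((a && p) || (b && r) || (a && q) || (b && s))) =
      (self && ((a && (p || q)) || (b && (r || s)))) := by
  revert self a b p q r s; decide

-- indexing the lowered list = lowering the indexed token
theorem pv_low_getD (tokens : List String) (i : Nat) :
    (tokens.map (fun t => PySem.Str.lower t)).getD i "" =
      PySem.Str.lower (tokens.getD i "") := by
  have h : ("" : String) = PySem.Str.lower "" := rfl
  conv_lhs => rw [h]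
  rw [List.getD_map]

-- A's label at index i equals the scan's formula at index i (tokens = t :: rest nonempty)
theorem pv_index_eq (t : String) (rest : List String) (i : Nat) (hi : i < rest.length + 1) :
    (if pvOrgIndicators.contains (PySem.Str.lower (PySem.List.pyGetD (t :: rest) (i : Int) "")) &&
        (((decide ((i : Int) > 0) && pvOrgIndicators.contains (PySem.Str.lower (PySem.List.pyGetD (t :: rest) ((i : Int) - 1) ""))) ||
          (decide ((i : Int) < PySem.List.len (t :: rest) - 1) && pvOrgIndicators.contains (PySem.Str.lower (PySem.List.pyGetD (t :: rest) ((i : Int) + 1) ""))) ||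
          (decide ((i : Int) > 0) && pvOrgContext.contains (PySem.Str.lower (PySem.List.pyGetD (t :: rest) ((i : Int) - 1) ""))) ||
          (decide ((i : Int) < PySem.List.len (t :: rest) - 1) && pvOrgContext.contains (PySem.Str.lower (PySem.List.pyGetD (t :: rest) ((i : Int) + 1) "")))))
     then (5 : Int) else (-1 : Int)) =
      (if pvOrgIndicators.contains ((PySem.Str.lower t :: rest.map (fun x => PySem.Str.lower x)).getD i "") &&
          ((if i = 0 then false
            else pvTrigger.contains ((PySem.Str.lower t :: rest.map (fun x => PySem.Str.lower x)).getD (i - 1) "")) ||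
           (decide (i + 1 < rest.length + 1) &&
            pvTrigger.contains ((PySem.Str.lower t :: rest.map (fun x => PySem.Str.lower x)).getD (i + 1) "")))
       then (5 : Int) else (-1 : Int)) := by
  have hL : (PySem.Str.lower t :: rest.map (fun x => PySem.Str.lower x)) =
      (t :: rest).map (fun x => PySem.Str.lower x) := by simp
  rw [hL, pv_bool_regroup]
  have hcur : PySem.List.pyGetD (t :: rest) (i : Int) "" = (t :: rest).getD i "" := by
    simp [PySem.List.pyGetD_natCast]
  have hnext : PySem.List.pyGetD (t :: rest) ((i : Int) + 1) "" = (t :: rest).getD (i + 1) "" := by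
    have h1 : ((i : Int) + 1) = ((i + 1 : Nat) : Int) := by push_cast; ring
    rw [h1, PySem.List.pyGetD_natCast]
  have hd2 : decide ((i : Int) < PySem.List.len (t :: rest) - 1) = decide (i + 1 < rest.length + 1) := by
    have hlen : PySem.List.len (t :: rest) = ((rest.length + 1 : Nat) : Int) := by
      simp [PySem.List.len]
    rw [hlen]; simp only [decide_eq_decide]; omega
  rw [hcur, hnext, hd2]
  simp only [pv_low_getD, pv_union_contains]
  cases i with
  | zero => simp
  | succ k =>
      have hprev : PySem.List.pyGetD (t :: rest) (((k + 1 : Nat) : Int) - 1) "" = (t :: rest).getD k "" := by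
        have h1 : (((k + 1 : Nat) : Int) - 1) = ((k : Nat) : Int) := by push_cast; ring
        rw [h1, PySem.List.pyGetD_natCast]
      rw [hprev]
      simp

-- ===== VERDICT (by name: the statement is the Claim_ definition above) =====
theorem label_sentence_Group_ORG_spec : Claim_equal_label_sentence_Group_ORG := by
  intro tokens _
  show label_sentence_Group_ORG tokens = label_sentence_Group_ORG_alt tokens
  cases tokens with
  | nil => decide
  | cons t rest =>
      have halt : label_sentence_Group_ORG_alt (t :: rest) =
          pvAltGo false (PySem.Str.lower t) rest := by
        have h := pv_fold_eq_go rest (([] : List Int), false, PySem.Str.lower t)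
        rw [List.nil_append] at h
        exact h
      rw [halt]
      unfold label_sentence_Group_ORG
      rw [PySem.List.foldl_append_singleton_eq_map,
        PySem.List.enumerate_eq_map_pyRange (t :: rest) "", List.map_map, List.nil_append]
      apply List.ext_getElem
      · simp [PySem.List.length_pyRange_one, PySem.List.len, pvAltGo_length]
      · intro i h1 h2
        have hi : i < rest.length + 1 := by
          simpa [pvAltGo_length] using h2
        rw [List.getElem_map, PySem.List.getElem_pyRange_one]
        have hR : (pvAltGo false (PySem.Str.lower t) rest)[i]'h2 =
            (pvAltGo false (PySem.Str.lower t) rest).getD i 0 :=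
          (List.getD_eq_getElem _ _ _).symm
        rw [hR, pvAltGo_getD rest false (PySem.Str.lower t) i hi]
        simp only [Function.comp_def, zero_add]
        exact pv_index_eq t rest i hi
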